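-- pv_equiv track=rewrite | github.com/tut-tuuut/advent-of-code-shiny-giggle | 2017/09/code.py | count_garbage
-- ===== SOURCE A (Python) =====
-- def count_garbage(raw_input):
--     ignore_mode = False
--     garbage_mode = False
--     global_score = 0
--     for char in raw_input:
--         if ignore_mode:
--             ignore_mode = False
--             continue
--         if garbage_mode:
--             if char == ">":
--                 garbage_mode = False
--             elif char == "!":
--                 ignore_mode = True
--             else:
--                 global_score += 1
--             continue
--         if char == "<":
--             garbage_mode = True
--     return global_score
-- ===== SOURCE B (Python) =====
-- import re
--
-- _GARBAGE = re.compile(r'<(?:![\s\S]|[^>])*>?')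
-- _ESCAPE = re.compile(r'![\s\S]?')
--
-- def count_garbage(raw_input):
--     total = 0
--     for m in _GARBAGE.finditer(raw_input):
--         content = m.group(0)[1:]
--         if content.endswith('>'):
--             content = content[:-1]
--         total += len(_ESCAPE.sub('', content))
--     return total
-- ===== Notes on version B (the rewrite author's own statement) =====
-- stated objective: idiomatic
-- what changed: Replaced the per-character three-flag state machine by staged regex passes: finditer locates each garbage span (with an optional trailing '>' for unterminated garbage), a second regex strips escape pairs from each span, and the stripped lengths are summed.
import Mathlib
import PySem

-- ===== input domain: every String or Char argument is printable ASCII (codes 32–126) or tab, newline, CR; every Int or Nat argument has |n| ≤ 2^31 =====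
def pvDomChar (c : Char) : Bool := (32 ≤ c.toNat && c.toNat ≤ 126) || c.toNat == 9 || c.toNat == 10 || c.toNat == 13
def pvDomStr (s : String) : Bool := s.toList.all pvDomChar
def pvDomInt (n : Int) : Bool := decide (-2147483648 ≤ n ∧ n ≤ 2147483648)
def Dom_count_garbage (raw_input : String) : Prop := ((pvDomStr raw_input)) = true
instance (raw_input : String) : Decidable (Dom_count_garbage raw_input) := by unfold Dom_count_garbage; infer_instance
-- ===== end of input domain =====

-- B replaces A's three-flag per-character state machine by staged passes: find each
-- garbage span (regex finditer in Source B), strip escape pairs from each span (regex sub),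
-- and sum the stripped lengths; objective: idiomatic.

-- ===== PORT A =====
-- A's loop body on the state (ignore_mode, garbage_mode, global_score)
def cgStepA (st : Bool × Bool × Int) (char : Char) : Bool × Bool × Int :=
  match st with
  | (ign, garb, score) =>
    if ign then (false, garb, score)
    else if garb then
      if char = '>' then (ign, false, score)
      else if char = '!' then (true, garb, score)
      else (ign, garb, score + 1)
    else if char = '<' then (ign, true, score)
    else (ign, garb, score)

def count_garbage (raw_input : String) : Int :=
  (raw_input.toList.foldl cgStepA (false, false, 0)).2.2

-- ===== PORT B =====
-- Hand-port of the regex r'<(?:![\s\S]|[^>])*>?' applied after the opening '<'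
-- (exact for this pattern): greedily consume an escape '!'+optional char or a
-- non-'>' char, then the optional closing '>'.
-- Returns (matched content after '<', remaining input).
def matchGarbage : List Char → List Char × List Char
  | [] => ([], [])
  | c :: rest =>
    if c = '>' then ([c], rest)
    else if c = '!' then
      ('!' :: rest.take 1 ++ (matchGarbage (rest.drop 1)).1, (matchGarbage (rest.drop 1)).2)
    else (c :: (matchGarbage rest).1, (matchGarbage rest).2)
termination_by l => l.length
decreasing_by
  · simp [List.length_drop]
  · simp

theorem matchGarbage_rest_le : ∀ (n : Nat) (l : List Char), l.length ≤ n →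
    (matchGarbage l).2.length ≤ l.length := by
  intro n
  induction n with
  | zero =>
    intro l hl
    have : l = [] := List.eq_nil_of_length_eq_zero (Nat.le_zero.mp hl)
    subst this; simp [matchGarbage]
  | succ n ih =>
    intro l hl
    cases l with
    | nil => simp [matchGarbage]
    | cons c rest =>
      have hr : rest.length ≤ n := by simp at hl; omega
      have hd : (rest.drop 1).length ≤ n := le_trans (by simp [List.length_drop]) hr
      rw [matchGarbage]
      split_ifs with h1 h2
      · simp
      · have := ih (rest.drop 1) hd
        simp [List.length_drop] at this ⊢; omega
      · have := ih rest hr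
        simp at this ⊢; omega

-- finditer: scan for '<', take the span, continue after it (exact for this pattern).
def findSpans : List Char → List (List Char)
  | [] => []
  | c :: rest =>
    if c = '<' then (matchGarbage rest).1 :: findSpans (matchGarbage rest).2
    else findSpans rest
termination_by l => l.length
decreasing_by
  · exact Nat.lt_succ_of_le (matchGarbage_rest_le rest.length rest le_rfl)
  · simp

-- content.endswith('>') check and the [:-1] slice of Source B
def stripTrailGt (c : List Char) : List Char :=
  if c.getLast? = some '>' then c.dropLast else c

-- Hand-port of re.sub(r'![\s\S]?', '', content): drop each '!' with the char after it.
def stripEsc : List Char → List Char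
  | [] => []
  | c :: rest =>
    if c = '!' then stripEsc (rest.drop 1)
    else c :: stripEsc rest
termination_by l => l.length
decreasing_by
  · simp [List.length_drop]
  · simp

def count_garbage_alt (raw_input : String) : Int :=
  ((findSpans raw_input.toList).map
    (fun g => ((stripEsc (stripTrailGt g)).length : Int))).sum

-- ===== PRECONDITION & SPEC =====
def Spec_count_garbage (raw_input : String) (out : Int) : Prop := out = count_garbage_alt raw_input
instance (raw_input : String) (out : Int) : Decidable (Spec_count_garbage raw_input out) := by unfold Spec_count_garbage; infer_instance

-- ===== CLAIM (what is proved, stated in full; the proofs are below) =====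
def Claim_equal_count_garbage : Prop := ∀ (raw_input : String), Dom_count_garbage raw_input → Spec_count_garbage raw_input (count_garbage raw_input)

-- ===== LEMMAS AND PROOFS =====

-- B's two modes as integers: total over the remaining stream / over a garbage span.
def bOuter (l : List Char) : Int :=
  ((findSpans l).map (fun g => ((stripEsc (stripTrailGt g)).length : Int))).sum

def bGarb (l : List Char) : Int :=
  ((stripEsc (stripTrailGt (matchGarbage l).1)).length : Int) + bOuter (matchGarbage l).2

theorem matchGarbage_fst_ne_nil (l : List Char) (h : l ≠ []) : (matchGarbage l).1 ≠ [] := by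
  match l with
  | [] => exact absurd rfl h
  | c :: rest =>
    rw [matchGarbage]
    split_ifs <;> simp

theorem stripTrailGt_cons {c : Char} {l : List Char} (h : l ≠ []) :
    stripTrailGt (c :: l) = c :: stripTrailGt l := by
  obtain ⟨a, t, rfl⟩ := List.exists_cons_of_ne_nil h
  unfold stripTrailGt
  rw [List.getLast?_cons_cons]
  split_ifs with hg
  · rfl
  · rfl

-- key invariant: A's fold from normal / garbage mode computes B's staged sums
theorem cg_key : ∀ (n : Nat) (l : List Char), l.length ≤ n → ∀ s : Int,
    (l.foldl cgStepA (false, false, s)).2.2 = s + bOuter l ∧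
    (l.foldl cgStepA (false, true, s)).2.2 = s + bGarb l := by
  intro n
  induction n with
  | zero =>
    intro l hl s
    have : l = [] := List.eq_nil_of_length_eq_zero (Nat.le_zero.mp hl)
    subst this
    simp [bOuter, bGarb, findSpans, matchGarbage, stripTrailGt, stripEsc]
  | succ n ih =>
    intro l hl s
    cases l with
    | nil => simp [bOuter, bGarb, findSpans, matchGarbage, stripTrailGt, stripEsc]
    | cons c rest =>
      have hr : rest.length ≤ n := by simp at hl; omega
      refine ⟨?_, ?_⟩
      · -- normal mode
        by_cases hc : c = '<'
        · have hg := (ih rest hr s).2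
          simp [List.foldl, cgStepA, hc] at hg ⊢
          rw [hg]
          simp [bOuter, bGarb, findSpans]
        · have ho := (ih rest hr s).1
          simp [List.foldl, cgStepA, hc] at ho ⊢
          rw [ho]
          simp [bOuter, findSpans, hc]
      · -- garbage mode
        by_cases hg : c = '>'
        · have ho := (ih rest hr s).1
          simp [List.foldl, cgStepA, hg] at ho ⊢
          rw [ho]
          simp [bGarb, matchGarbage, stripTrailGt, stripEsc, bOuter]
        · by_cases hb : c = '!'
          · cases rest with
            | nil =>
              simp [List.foldl, cgStepA, hb, bGarb, matchGarbage,
                    stripTrailGt, stripEsc, bOuter, findSpans]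
            | cons d rest' =>
              have hr' : rest'.length ≤ n := by simp at hl; omega
              have hgr := (ih rest' hr' s).2
              simp [List.foldl, cgStepA, hb] at hgr ⊢
              rw [hgr]
              unfold bGarb
              rw [show matchGarbage ('!' :: d :: rest') =
                    ('!' :: d :: (matchGarbage rest').1, (matchGarbage rest').2) from by
                    rw [matchGarbage]; simp]
              by_cases hnil : rest' = []
              · subst hnil
                simp only [matchGarbage]
                simp [stripTrailGt, stripEsc]
                split_ifs <;> simp [stripEsc]
              · have h1 : (matchGarbage rest').1 ≠ [] := matchGarbage_fst_ne_nil rest' hnil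
                have h2 : (d :: (matchGarbage rest').1 : List Char) ≠ [] := by simp
                rw [stripTrailGt_cons h2, stripTrailGt_cons h1]
                rw [show stripEsc ('!' :: d :: stripTrailGt (matchGarbage rest').1) =
                      stripEsc (stripTrailGt (matchGarbage rest').1) from by
                      rw [stripEsc]; simp]
          · -- ordinary garbage char: counted
            have hgr := (ih rest hr (s + 1)).2
            simp [List.foldl, cgStepA, hg, hb] at hgr ⊢
            rw [hgr]
            unfold bGarb
            rw [show matchGarbage (c :: rest) =
                  (c :: (matchGarbage rest).1, (matchGarbage rest).2) from by
                  rw [matchGarbage]; simp [hg, hb]]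
            by_cases hnil : rest = []
            · subst hnil
              simp [matchGarbage, stripTrailGt, stripEsc, bOuter, findSpans, hg, hb]
            · have h1 : (matchGarbage rest).1 ≠ [] := matchGarbage_fst_ne_nil rest hnil
              rw [stripTrailGt_cons h1]
              rw [show stripEsc (c :: stripTrailGt (matchGarbage rest).1) =
                    c :: stripEsc (stripTrailGt (matchGarbage rest).1) from by
                    rw [stripEsc]; simp [hb]]
              simp only [List.length_cons]
              push_cast
              ring

-- ===== VERDICT (by name: the statement is the Claim_ definition above) =====
theorem count_garbage_spec : Claim_equal_count_garbage := by
  intro raw_input _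
  unfold Spec_count_garbage count_garbage count_garbage_alt
  have h := (cg_key raw_input.toList.length raw_input.toList le_rfl 0).1
  rw [h]
  simp [bOuter]
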